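-- pv_equiv track=rewrite | github.com/shaoyefeng/SoAL_Screening | code20211130/fpt_util.py | squeeze_cir_bouts
-- ===== SOURCE A (Python) =====
-- def squeeze_cir_bouts(bouts):
--     ret = []
--     f = 0
--     for s, e in bouts:
--         l = e - s
--         ret.append([f, f + l])
--         f += l
--     return ret
-- ===== SOURCE B (Python) =====
-- def squeeze_cir_bouts(bouts):
--     # closed form: the i-th output pair is [sum of the first i lengths, sum of the first i+1 lengths]
--     lengths = [e - s for s, e in bouts]
--     return [[sum(lengths[:i]), sum(lengths[:i + 1])] for i in range(len(lengths))]
-- ===== Notes on version B (the rewrite author's own statement) =====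
-- stated objective: alternative
-- what changed: Replaces the running-accumulator loop by a closed form: each output pair is computed directly as the prefix sums of the interval lengths, [sum(lengths[:i]), sum(lengths[:i+1])], with no mutable state.
import Mathlib
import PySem

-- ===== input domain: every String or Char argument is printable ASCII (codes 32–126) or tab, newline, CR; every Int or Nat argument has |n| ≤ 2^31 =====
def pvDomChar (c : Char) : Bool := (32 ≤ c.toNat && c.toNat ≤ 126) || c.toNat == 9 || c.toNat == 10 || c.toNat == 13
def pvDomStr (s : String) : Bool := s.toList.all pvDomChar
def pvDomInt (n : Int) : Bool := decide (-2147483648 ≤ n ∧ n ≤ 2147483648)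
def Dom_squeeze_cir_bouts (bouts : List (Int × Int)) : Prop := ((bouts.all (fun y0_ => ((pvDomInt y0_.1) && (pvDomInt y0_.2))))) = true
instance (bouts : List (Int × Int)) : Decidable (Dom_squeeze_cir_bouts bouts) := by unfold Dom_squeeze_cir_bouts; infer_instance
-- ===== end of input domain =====

-- B replaces A's running-accumulator loop by a closed form over prefix sums of the interval lengths (alternative decomposition, same return value).


-- ===== PORT A =====
-- literal port of A: single pass with accumulator (ret, f); each bout appends [f, f+l] and advances f by l = e - s
def squeeze_cir_bouts (bouts : List (Int × Int)) : List (List Int) :=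
  (bouts.foldl (fun (acc : List (List Int) × Int) p =>
      let l := p.2 - p.1
      (acc.1 ++ [[acc.2, acc.2 + l]], acc.2 + l)) ([], 0)).1

-- ===== PORT B =====
-- literal port of B: lengths table first, then closed-form pairing of prefix sums (sum(lengths[:i]) = (lengths.take i).sum)
def squeeze_cir_bouts_alt (bouts : List (Int × Int)) : List (List Int) :=
  let lengths := bouts.map (fun p => p.2 - p.1)
  (List.range lengths.length).map (fun i =>
    [(lengths.take i).sum, (lengths.take (i + 1)).sum])

-- ===== PRECONDITION & SPEC =====
def Spec_squeeze_cir_bouts (bouts : List (Int × Int)) (out : List (List Int)) : Prop := out = squeeze_cir_bouts_alt bouts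
instance (bouts : List (Int × Int)) (out : List (List Int)) : Decidable (Spec_squeeze_cir_bouts bouts out) := by unfold Spec_squeeze_cir_bouts; infer_instance

-- ===== CLAIM (what is proved, stated in full; the proofs are below) =====
def Claim_equal_squeeze_cir_bouts : Prop := ∀ (bouts : List (Int × Int)), Dom_squeeze_cir_bouts bouts → Spec_squeeze_cir_bouts bouts (squeeze_cir_bouts bouts)

-- ===== LEMMAS AND PROOFS =====

-- A's fold from any state (acc, f) appends the prefix-sum pairs shifted by f
theorem squeeze_fold_eq (bouts : List (Int × Int)) (acc : List (List Int)) (f : Int) :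
    (bouts.foldl (fun (acc : List (List Int) × Int) p =>
        let l := p.2 - p.1
        (acc.1 ++ [[acc.2, acc.2 + l]], acc.2 + l)) (acc, f)).1
      = acc ++ (List.range bouts.length).map (fun i =>
          [f + ((bouts.map (fun p => p.2 - p.1)).take i).sum,
           f + ((bouts.map (fun p => p.2 - p.1)).take (i + 1)).sum]) := by
  induction bouts generalizing acc f with
  | nil => simp
  | cons hd tl ih =>
    simp only [List.foldl_cons, List.map_cons, List.length_cons]
    rw [ih]
    rw [List.range_succ_eq_map, List.map_cons, List.map_map]
    simp [List.append_assoc, Function.comp, add_assoc]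

-- ===== VERDICT (by name: the statement is the Claim_ definition above) =====
theorem squeeze_cir_bouts_spec : Claim_equal_squeeze_cir_bouts := by
  intro bouts _
  unfold Spec_squeeze_cir_bouts squeeze_cir_bouts squeeze_cir_bouts_alt
  rw [squeeze_fold_eq]
  simp
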